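-- pv_equiv track=rewrite | github.com/varunmundas-de-stack/convAI-multi-tenant-cubejs | query_engine/query_validator.py | _dimension_likely_needed
-- ===== SOURCE A (Python) =====
-- def _dimension_likely_needed(question_lower: str, dimension: str) -> bool:
--     """Determine if dimension is likely needed for this question"""
--     # Time is almost always needed for analytics questions
--     if dimension == 'time':
--         action_words = ['show', 'get', 'what', 'how many', 'how much', 'total', 'average']
--         return any(word in question_lower for word in action_words)
--
--     # Sales type needed when asking about sales
--     if dimension == 'sales_type':
--         return 'sales' in question_lower or 'revenue' in question_lower
--
--     # Product context helpful for product-related questions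
--     if dimension == 'product':
--         return 'product' in question_lower or 'sku' in question_lower
--
--     return False
-- ===== SOURCE B (Python) =====
-- # Inverted index: scan every (keyword, dimension) pair once, collect the set of
-- # dimensions hinted at by the question, then answer by membership.
-- _KEYWORD_TO_DIM = [
--     ('show', 'time'), ('get', 'time'), ('what', 'time'), ('how many', 'time'),
--     ('how much', 'time'), ('total', 'time'), ('average', 'time'),
--     ('sales', 'sales_type'), ('revenue', 'sales_type'),
--     ('product', 'product'), ('sku', 'product'),
-- ]
--
-- def _dimension_likely_needed(question_lower: str, dimension: str) -> bool:
--     relevant = [dim for kw, dim in _KEYWORD_TO_DIM if kw in question_lower]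
--     return dimension in relevant
-- ===== Notes on version B (the rewrite author's own statement) =====
-- stated objective: alternative
-- what changed: Inverts the data flow: instead of dispatching on the dimension and scanning that branch's keywords, B scans one flat (keyword -> dimension) inverted index over the whole question, builds the list of all dimensions the question hints at, and answers by membership of the requested dimension.
import Mathlib
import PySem

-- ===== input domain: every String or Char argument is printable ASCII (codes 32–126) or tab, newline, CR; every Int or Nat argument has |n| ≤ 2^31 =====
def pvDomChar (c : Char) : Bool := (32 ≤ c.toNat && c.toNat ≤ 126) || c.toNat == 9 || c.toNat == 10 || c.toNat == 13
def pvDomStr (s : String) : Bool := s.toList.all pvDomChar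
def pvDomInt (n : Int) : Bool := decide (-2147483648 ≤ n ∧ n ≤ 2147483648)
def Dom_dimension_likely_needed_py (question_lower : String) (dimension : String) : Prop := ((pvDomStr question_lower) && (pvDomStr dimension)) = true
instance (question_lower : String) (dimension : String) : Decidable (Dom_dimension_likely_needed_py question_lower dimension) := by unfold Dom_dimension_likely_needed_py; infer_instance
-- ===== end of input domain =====

-- B inverts the data flow: one flat (keyword, dimension) inverted index scanned over the whole question, then membership of the requested dimension (objective: alternative).


-- ===== PORT A =====
def dimension_likely_needed_py (question_lower : String) (dimension : String) : Bool :=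
  if dimension == "time" then
    let action_words := ["show", "get", "what", "how many", "how much", "total", "average"]
    action_words.any (fun word => PySem.Str.isIn word question_lower)
  else if dimension == "sales_type" then
    PySem.Str.isIn "sales" question_lower || PySem.Str.isIn "revenue" question_lower
  else if dimension == "product" then
    PySem.Str.isIn "product" question_lower || PySem.Str.isIn "sku" question_lower
  else
    false

-- ===== PORT B =====
def pvKeywordToDim : List (String × String) :=
  [("show", "time"), ("get", "time"), ("what", "time"), ("how many", "time"),
   ("how much", "time"), ("total", "time"), ("average", "time"),
   ("sales", "sales_type"), ("revenue", "sales_type"),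
   ("product", "product"), ("sku", "product")]

def dimension_likely_needed_py_alt (question_lower : String) (dimension : String) : Bool :=
  let relevant := (pvKeywordToDim.filter (fun p => PySem.Str.isIn p.1 question_lower)).map (fun p => p.2)
  relevant.contains dimension

-- ===== PRECONDITION & SPEC =====
def Spec_dimension_likely_needed_py (question_lower : String) (dimension : String) (out : Bool) : Prop := out = dimension_likely_needed_py_alt question_lower dimension
instance (question_lower : String) (dimension : String) (out : Bool) : Decidable (Spec_dimension_likely_needed_py question_lower dimension out) := by unfold Spec_dimension_likely_needed_py; infer_instance

-- ===== CLAIM (what is proved, stated in full; the proofs are below) =====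
def Claim_equal_dimension_likely_needed_py : Prop := ∀ (question_lower : String) (dimension : String), Dom_dimension_likely_needed_py question_lower dimension → Spec_dimension_likely_needed_py question_lower dimension (dimension_likely_needed_py question_lower dimension)

-- ===== LEMMAS AND PROOFS =====

-- membership of d in the second components of the pairs kept by the filter, as one `any` over the pair list
theorem pv_contains_map_snd_filter (l : List (String × String)) (p : String × String → Bool) (d : String) :
    ((l.filter p).map (fun x => x.2)).contains d = l.any (fun x => p x && (x.2 == d)) := by
  induction l with
  | nil => rfl
  | cons a t ih =>
    simp only [List.filter_cons, List.any_cons, ← ih]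
    by_cases hp : p a <;> by_cases hd : a.2 = d <;> simp [hp, hd, BEq.comm]

-- ===== VERDICT (by name: the statement is the Claim_ definition above) =====
theorem dimension_likely_needed_py_spec : Claim_equal_dimension_likely_needed_py := by
  intro q d _
  unfold Spec_dimension_likely_needed_py dimension_likely_needed_py dimension_likely_needed_py_alt
  rw [pv_contains_map_snd_filter]
  unfold pvKeywordToDim
  simp only [List.any_cons, List.any_nil]
  by_cases h1 : d = "time"
  · subst h1; simp
  · by_cases h2 : d = "sales_type"
    · subst h2; simp
    · by_cases h3 : d = "product"
      · subst h3; simp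
      · simp [h1, h2, h3, Ne.symm]
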